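-- pv_equiv track=rewrite | github.com/NikolaiRaddeSchubeler/VS_code_projektfils | Projekt.py | _column_to_index
-- ===== SOURCE A (Python) =====
-- def _column_to_index(text):
--     if text is None:
--         return None
--     raw = str(text).strip().upper()
--     if not raw:
--         return None
--     if raw.isdigit():
--         idx = int(raw) - 1
--         return idx if idx >= 0 else None
--     if not raw.isalpha():
--         return None
--     value = 0
--     for ch in raw:
--         value = value * 26 + (ord(ch) - ord("A") + 1)
--     return value - 1
-- ===== SOURCE B (Python) =====
-- _B26 = str.maketrans("ABCDEFGHIJKLMNOPQRSTUVWXYZ", "0123456789abcdefghijklmnop")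
--
--
-- def _column_to_index(text):
--     if text is None:
--         return None
--     raw = str(text).strip().upper()
--     if not raw:
--         return None
--     if raw.isdigit():
--         idx = int(raw) - 1
--         return idx if idx >= 0 else None
--     if not raw.isalpha():
--         return None
--     # A label of n letters comes after all (26**n - 26) // 25 shorter labels;
--     # within its length it is ranked as an ordinary base-26 numeral (A=0 .. Z=25).
--     n = len(raw)
--     offset = (26 ** n - 26) // 25
--     rank = int(raw.translate(_B26), 26)
--     return offset + rank
-- ===== Notes on version B (the rewrite author's own statement) =====
-- stated objective: alternative
-- what changed: A's bijective base-26 Horner loop (digits 1-26, minus 1 at the end) is replaced by a loop-free counting formula: the closed-form count (26**n - 26)//25 of all shorter labels plus the label's ordinary base-26 rank, computed by translating the letters to digit characters with str.translate and parsing them with int(., 26).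
import Mathlib
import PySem

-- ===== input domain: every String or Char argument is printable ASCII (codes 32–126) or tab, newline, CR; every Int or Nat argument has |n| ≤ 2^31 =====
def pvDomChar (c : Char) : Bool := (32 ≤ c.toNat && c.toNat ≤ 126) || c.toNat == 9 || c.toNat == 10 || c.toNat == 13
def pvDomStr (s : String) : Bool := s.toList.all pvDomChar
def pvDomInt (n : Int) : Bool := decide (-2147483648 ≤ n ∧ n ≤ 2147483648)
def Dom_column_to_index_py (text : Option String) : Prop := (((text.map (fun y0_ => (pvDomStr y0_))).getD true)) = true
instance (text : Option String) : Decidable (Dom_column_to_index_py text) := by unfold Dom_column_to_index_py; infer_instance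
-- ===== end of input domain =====

-- B replaces A's bijective-base-26 Horner loop by counting: (26^n - 26)//25 labels are shorter, plus the
-- label's ordinary base-26 rank obtained by translating letters to digit characters and calling int(., 26)
-- (alternative algorithm, same cost); return values agree everywhere.

-- ===== PORT A =====
def column_to_index_py (text : Option String) : Option Int :=
  match text with
  | none => none
  | some t =>
    let raw := PySem.Chars.upper (PySem.Chars.strip t.toList)
    if raw = [] then none
    else if PySem.Chars.strIsdigit raw then
      -- int(raw) succeeds since raw.isdigit(); ofChars? is exact, none is unreachable here
      match PySem.Int.ofChars? raw with
      | some n => let idx := n - 1; if idx ≥ 0 then some idx else none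
      | none => none
    else if ¬ PySem.Chars.strIsalpha raw then none
    else
      some (raw.foldl (fun v ch => v * 26 + ((ch.toNat : Int) - 65 + 1)) 0 - 1)

-- ===== PORT B =====
-- the str.maketrans table "A..Z" → "0123456789abcdefghijklmnop"
def pvTableB26 : List Char := "0123456789abcdefghijklmnop".toList

-- port of str.translate with the table above: chars 'A'..'Z' are replaced, all others kept
def pvTransB26 (c : Char) : Char :=
  if 65 ≤ c.toNat ∧ c.toNat ≤ 90 then pvTableB26.getD (c.toNat - 65) c else c

-- hand port of int(s, 26), exact on the pure digit strings [0-9a-p]+ produced by pvTransB26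
-- (the only strings B ever passes to it: no sign, whitespace, prefix or underscore occurs)
def pvParse26 (cs : List Char) : Int :=
  cs.foldl (fun r c => r * 26 + (if c.toNat ≤ 57 then (c.toNat : Int) - 48 else (c.toNat : Int) - 87)) 0

def column_to_index_py_alt (text : Option String) : Option Int :=
  match text with
  | none => none
  | some t =>
    let raw := PySem.Chars.upper (PySem.Chars.strip t.toList)
    if raw = [] then none
    else if PySem.Chars.strIsdigit raw then
      match PySem.Int.ofChars? raw with
      | some n => let idx := n - 1; if idx ≥ 0 then some idx else none
      | none => none
    else if ¬ PySem.Chars.strIsalpha raw then none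
    else
      let n := raw.length
      let offset := PySem.Int.floordiv (26 ^ n - 26) 25
      let rank := pvParse26 (raw.map pvTransB26)
      some (offset + rank)

-- ===== PRECONDITION & SPEC =====
def Spec_column_to_index_py (text : Option String) (out : Option Int) : Prop := out = column_to_index_py_alt text
instance (text : Option String) (out : Option Int) : Decidable (Spec_column_to_index_py text out) := by unfold Spec_column_to_index_py; infer_instance

-- ===== CLAIM (what is proved, stated in full; the proofs are below) =====
def Claim_equal_column_to_index_py : Prop := ∀ (text : Option String), Dom_column_to_index_py text → Spec_column_to_index_py text (column_to_index_py text)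

-- ===== LEMMAS AND PROOFS =====

-- ∑_{i<n} 26^i, the number of labels of length < n+1 ... (proof-only helper)
def pvGeom : Nat → Int
  | 0 => 0
  | n + 1 => pvGeom n + 26 ^ n

theorem pv_geom_mul (n : Nat) : 25 * pvGeom n = 26 ^ n - 1 := by
  induction n with
  | zero => simp [pvGeom]
  | succ n ih => rw [pvGeom, pow_succ]; linarith

theorem pv_offset (n : Nat) : PySem.Int.floordiv (26 ^ n - 26) 25 = pvGeom n - 1 := by
  rw [PySem.Int.floordiv_eq_iff_of_pos (by norm_num)]
  have h := pv_geom_mul n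
  constructor <;> linarith

-- A's bijective Horner fold, related to the plain base-26 fold with shifted digits
theorem pv_fold_shift (cs : List Char) (v w : Int) :
    cs.foldl (fun v c => v * 26 + ((c.toNat : Int) - 65 + 1)) v
      = cs.foldl (fun v c => v * 26 + ((c.toNat : Int) - 65)) w
        + (v - w) * 26 ^ cs.length + pvGeom cs.length := by
  induction cs generalizing v w with
  | nil => simp [pvGeom]
  | cons c cs ih =>
    simp only [List.foldl_cons, List.length_cons, pvGeom]
    rw [ih (v * 26 + ((c.toNat : Int) - 65 + 1)) (w * 26 + ((c.toNat : Int) - 65))]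
    ring

-- an alphabetic character of an uppercased string lies in 'A'..'Z'
theorem pv_upper_alpha_range (c : Char)
    (h : PySem.Chars.isalpha (PySem.Chars.upperChar c) = true) :
    65 ≤ (PySem.Chars.upperChar c).toNat ∧ (PySem.Chars.upperChar c).toNat ≤ 90 := by
  unfold PySem.Chars.upperChar at h ⊢
  by_cases hl : PySem.Chars.islower c = true
  · have hl' := hl
    unfold PySem.Chars.islower at hl'
    rw [Bool.and_eq_true, decide_eq_true_eq, decide_eq_true_eq, Char.le_def, Char.le_def] at hl'
    have h1' : 97 ≤ c.toNat := UInt32.le_iff_toNat_le.mp hl'.1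
    have h2' : c.toNat ≤ 122 := UInt32.le_iff_toNat_le.mp hl'.2
    have hv : (c.toNat - 32).isValidChar := Or.inl (by omega)
    rw [if_pos hl, Char.toNat_ofNat, if_pos hv]
    omega
  · rw [if_neg hl] at h ⊢
    unfold PySem.Chars.isalpha PySem.Chars.isupper PySem.Chars.islower at h
    rw [Bool.or_eq_true, Bool.and_eq_true, Bool.and_eq_true] at h
    rcases h with ⟨h1, h2⟩ | h2
    · rw [decide_eq_true_eq, Char.le_def] at h1
      rw [decide_eq_true_eq, Char.le_def] at h2
      exact ⟨UInt32.le_iff_toNat_le.mp h1, UInt32.le_iff_toNat_le.mp h2⟩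
    · exact absurd (Bool.and_eq_true .. ▸ h2) hl

-- the translate table followed by the digit parse recovers the letter's 0-based value
theorem pv_trans_digit (c : Char) (h65 : 65 ≤ c.toNat) (h90 : c.toNat ≤ 90) :
    (if (pvTransB26 c).toNat ≤ 57 then ((pvTransB26 c).toNat : Int) - 48
     else ((pvTransB26 c).toNat : Int) - 87) = (c.toNat : Int) - 65 := by
  have key : ∀ k : Nat, k < 26 →
      (if (pvTableB26.getD k ' ').toNat ≤ 57 then ((pvTableB26.getD k ' ').toNat : Int) - 48
       else ((pvTableB26.getD k ' ').toNat : Int) - 87) = (k : Int) := by decide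
  have hk : c.toNat - 65 < 26 := by omega
  have hlen : c.toNat - 65 < pvTableB26.length := by
    have : pvTableB26.length = 26 := by decide
    omega
  have hEq : pvTransB26 c = pvTableB26[c.toNat - 65] := by
    unfold pvTransB26
    rw [if_pos ⟨h65, h90⟩, List.getD_eq_getElem _ c hlen]
  have hkey := key (c.toNat - 65) hk
  rw [List.getD_eq_getElem _ ' ' hlen] at hkey
  rw [hEq, hkey]
  omega

-- B's rank equals the plain base-26 fold over the letters themselves
theorem pv_rank_eq (cs : List Char) (hmem : ∀ c ∈ cs, 65 ≤ c.toNat ∧ c.toNat ≤ 90) :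
    pvParse26 (cs.map pvTransB26)
      = cs.foldl (fun v c => v * 26 + ((c.toNat : Int) - 65)) 0 := by
  unfold pvParse26
  rw [List.foldl_map]
  exact PySem.List.foldl_congr_mem cs _ _ 0 (fun acc x hx => by
    rw [pv_trans_digit x (hmem x hx).1 (hmem x hx).2])

-- ===== VERDICT =====
theorem column_to_index_py_spec : Claim_equal_column_to_index_py := by
  intro text _
  unfold Spec_column_to_index_py column_to_index_py column_to_index_py_alt
  cases text with
  | none => rfl
  | some t =>
    simp only []
    split_ifs with h1 h2 h3
    · rfl
    · rfl
    · -- alpha branch (h3 : strIsalpha raw = true)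
      have halpha : ∀ c ∈ PySem.Chars.upper (PySem.Chars.strip t.toList),
          65 ≤ c.toNat ∧ c.toNat ≤ 90 := by
        intro c hc
        unfold PySem.Chars.strIsalpha at h3
        rw [Bool.and_eq_true, List.all_eq_true] at h3
        have hA := h3.2 c hc
        unfold PySem.Chars.upper at hc
        obtain ⟨c0, _, rfl⟩ := List.mem_map.mp hc
        exact pv_upper_alpha_range c0 hA
      rw [pv_rank_eq _ halpha, pv_offset, pv_fold_shift _ 0 0]
      congr 1
      ring
    · rfl
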